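-- pv_equiv track=rewrite | github.com/adiConsultadd/DiagramAI | src/architecturegeneration/tools/custom_tool.py | _run
-- ===== SOURCE A (Python) =====
-- def _run(text: str, section_names: list) -> dict:
--     """Extract specific sections from text."""
--     results = {}
--     lines = text.split("\n")
--
--     current_section = None
--     section_content = []
--
--     # List of possible section markers
--     markers = [f"{i}. " for i in range(1, 10)] + [f"{i}." for i in range(1, 10)]
--
--     for line in lines:
--         line_stripped = line.strip()
--
--         # Check if this line is a section header we're looking for
--         found_new_section = False
--         for section in section_names:
--             for marker in markers:
--                 if (
--                     line_stripped == section
--                     or line_stripped == f"{marker}{section}"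
--                     or line_stripped == f"{marker} {section}"
--                 ):
--                     # If we were collecting content for a previous section, save it
--                     if current_section in section_names:
--                         results[current_section] = "\n".join(
--                             section_content
--                         ).strip()
--
--                     # Start new section
--                     current_section = section
--                     section_content = []
--                     found_new_section = True
--                     break
--
--             # Also check for exact matches without numbering
--             if line_stripped == section:
--                 if current_section in section_names:
--                     results[current_section] = "\n".join(section_content).strip()
--                 current_section = section
--                 section_content = []
--                 found_new_section = True
--                 break
--
--         if found_new_section:
--             continue
--
--         # Check if we've reached the next section (which we're not interested in)
--         for marker in markers:
--             if (
--                 line_stripped.startswith(marker)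
--                 and current_section in section_names
--             ):
--                 # We've hit a new numbered section, save the current one
--                 results[current_section] = "\n".join(section_content).strip()
--                 current_section = None
--                 break
--
--         # Add the line to the current section if we're tracking one
--         if current_section in section_names:
--             section_content.append(line)
--
--     # Add the final section if we were collecting one
--     if current_section in section_names:
--         results[current_section] = "\n".join(section_content).strip()
--
--     return results
-- ===== SOURCE B (Python) =====
-- def _run(text: str, section_names: list) -> dict:
--     """Extract specific sections from text."""
--     lines = text.split("\n")
--     nameset = set(section_names)
--
--     def classify(line):
--         # a header variant is: c, or "<d>."+c, "<d>. "+c, "<d>.  "+c for a digit 1-9,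
--         # so the candidate section names are s, s[2:], s[3:], s[4:]
--         s = line.strip()
--         if s in nameset:
--             return s
--         if len(s) >= 2 and s[0] in "123456789" and s[1] == ".":
--             if s[2:] in nameset:
--                 return s[2:]
--             if s[2:3] == " " and s[3:] in nameset:
--                 return s[3:]
--             if s[2:4] == "  " and s[4:] in nameset:
--                 return s[4:]
--             return True  # a numbered line, but not one of ours
--         return False
--
--     kinds = [classify(l) for l in lines]
--     results = {}
--     for i, k in enumerate(kinds):
--         if isinstance(k, str):
--             body = []
--             for j in range(i + 1, len(lines)):
--                 if kinds[j] is not False: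
--                     break
--                 body.append(lines[j])
--             results[k] = "\n".join(body).strip()
--     return results
-- ===== Notes on version B (the rewrite author's own statement) =====
-- stated objective: faster
-- what changed: Replaces A's stateful line-by-line accumulator (per line a nested sections-by-markers scan that rebuilds marker+section strings, with mutable current-section/content state) by a two-phase pipeline: one O(1)-per-line classification pass that looks up the only four possible candidate slices (s, s[2:], s[3:], s[4:]) in a set of the section names, then a direct content-range extraction per header occurrence.
-- outside the precondition, e.g. on _run('1. A', ['A', '1. A']): A returns {'A': '', '1. A': ''}, B returns {'1. A': ''}
import Mathlib
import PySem

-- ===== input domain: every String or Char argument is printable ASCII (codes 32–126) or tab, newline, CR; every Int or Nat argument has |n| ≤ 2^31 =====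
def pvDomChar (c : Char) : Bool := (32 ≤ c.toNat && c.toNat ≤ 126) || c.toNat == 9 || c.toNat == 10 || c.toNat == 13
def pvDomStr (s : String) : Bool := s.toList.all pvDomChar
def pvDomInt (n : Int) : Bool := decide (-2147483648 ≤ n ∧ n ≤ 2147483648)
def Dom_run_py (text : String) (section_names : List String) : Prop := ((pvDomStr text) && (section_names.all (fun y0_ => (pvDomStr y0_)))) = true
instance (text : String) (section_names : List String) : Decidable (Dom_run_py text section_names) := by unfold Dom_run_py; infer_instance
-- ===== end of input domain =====

-- B replaces A's stateful line-by-line accumulator by precomputed header-variant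
-- sets, one classification pass and direct per-header content ranges (faster by a
-- constant factor: no per-line marker+section string building).
-- All string work is done on List Char via PySem.Chars (exact on the ASCII domain).

-- ===== PORT A =====
-- the 'markers' list both Pythons build: ["1. ",…,"9. ", "1.",…,"9."] (as char lists)
def pvMarkers : List (List Char) :=
  ((PySem.List.pyRange 1 10 1).map (fun i => PySem.Int.toChars i ++ ".".toList ++ " ".toList)) ++
  ((PySem.List.pyRange 1 10 1).map (fun i => PySem.Int.toChars i ++ ".".toList))

-- "if current_section in section_names: results[current_section] = '\n'.join(section_content).strip()"
def pvSaveA (names : List String) (res : PySem.Dict String String)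
    (cur : Option String) (content : List (List Char)) : PySem.Dict String String :=
  match cur with
  | some c =>
    if names.contains c then
      res.insert c (String.ofList (PySem.Chars.strip (PySem.Chars.join "\n".toList content)))
    else res
  | none => res

-- the inner "for marker in markers: if …: save; start new section; break"
def pvMarkerLoopA (names : List String) (s : List Char) (c : String) (ms : List (List Char))
    (res : PySem.Dict String String) (cur : Option String) (content : List (List Char)) :
    PySem.Dict String String × Option String × List (List Char) × Bool :=
  match ms with
  | [] => (res, cur, content, false)
  | m :: ms' =>
    if s == c.toList || s == m ++ c.toList || s == m ++ (' ' :: c.toList) then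
      (pvSaveA names res cur content, some c, [], true)
    else
      pvMarkerLoopA names s c ms' res cur content

-- the outer "for section in section_names: … marker loop …; if line_stripped == section: save; start; break"
def pvSectionLoopA (names : List String) (s : List Char) (secs : List String)
    (res : PySem.Dict String String) (cur : Option String) (content : List (List Char))
    (found : Bool) : PySem.Dict String String × Option String × List (List Char) × Bool :=
  match secs with
  | [] => (res, cur, content, found)
  | c :: rest =>
    let r1 := pvMarkerLoopA names s c pvMarkers res cur content
    let found1 := found || r1.2.2.2
    if s == c.toList then
      (pvSaveA names r1.1 r1.2.1 r1.2.2.1, some c, [], true)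
    else
      pvSectionLoopA names s rest r1.1 r1.2.1 r1.2.2.1 found1

-- "for marker in markers: if line_stripped.startswith(marker) and current_section in section_names: save; current=None; break"
def pvBoundaryLoopA (names : List String) (s : List Char) (ms : List (List Char))
    (res : PySem.Dict String String) (cur : Option String) (content : List (List Char)) :
    PySem.Dict String String × Option String :=
  match ms with
  | [] => (res, cur)
  | m :: ms' =>
    if PySem.Chars.startswith s m &&
        (match cur with | some c => names.contains c | none => false) then
      (pvSaveA names res cur content, none)
    else
      pvBoundaryLoopA names s ms' res cur content

-- one iteration of "for line in lines"
def pvLineA (names : List String)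
    (st : PySem.Dict String String × Option String × List (List Char)) (line : List Char) :
    PySem.Dict String String × Option String × List (List Char) :=
  let s := PySem.Chars.strip line
  let r := pvSectionLoopA names s names st.1 st.2.1 st.2.2 false
  if r.2.2.2 then (r.1, r.2.1, r.2.2.1)
  else
    let b := pvBoundaryLoopA names s pvMarkers r.1 r.2.1 r.2.2.1
    let content2 :=
      match b.2 with
      | some c => if names.contains c then r.2.2.1 ++ [line] else r.2.2.1
      | none => r.2.2.1
    (b.1, b.2, content2)

def run_py (text : String) (section_names : List String) : List (String × String) :=
  let lines := PySem.Chars.splitOn text.toList "\n".toList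
  let fin := lines.foldl (pvLineA section_names) (PySem.Dict.empty, none, [])
  (pvSaveA section_names fin.1 fin.2.1 fin.2.2).items

-- ===== PORT B =====
inductive PvKind where
  | header : String → PvKind
  | boundary : PvKind
  | plain : PvKind
deriving DecidableEq, Repr

def pvIsPlain : PvKind → Bool
  | .plain => true
  | _ => false

-- Source B's classify: the only header variants are s, s[2:], s[3:], s[4:] behind a
-- digit-dot prefix, looked up in the set of section names; with s = a :: b :: t,
-- the slices are s[2:] = t, s[2:3] = t.take 1, s[3:] = t.drop 1, s[2:4] = t.take 2,
-- s[4:] = t.drop 2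
def pvClassifyB (nameset : PySem.Set (List Char)) (line : List Char) : PvKind :=
  let s := PySem.Chars.strip line
  if nameset.contains s then .header (String.ofList s)
  else
    match s with
    | a :: b :: t =>
      if "123456789".toList.contains a && b == '.' then
        if nameset.contains t then .header (String.ofList t)
        else if t.take 1 == [' '] && nameset.contains (t.drop 1) then
          .header (String.ofList (t.drop 1))
        else if t.take 2 == [' ', ' '] && nameset.contains (t.drop 2) then
          .header (String.ofList (t.drop 2))
        else .boundary
      else .plain
    | _ => .plain

-- Source B's second pass: for each header line, content = following lines while plain
def pvCollectB (res : PySem.Dict String String) :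
    List (List Char × PvKind) → PySem.Dict String String
  | [] => res
  | (_, k) :: rest =>
    match k with
    | .header c =>
      pvCollectB (res.insert c (String.ofList (PySem.Chars.strip (PySem.Chars.join "\n".toList
        ((rest.takeWhile (fun p => pvIsPlain p.2)).map (·.1)))))) rest
    | _ => pvCollectB res rest

def run_py_alt (text : String) (section_names : List String) : List (String × String) :=
  let lines := PySem.Chars.splitOn text.toList "\n".toList
  let nameset := PySem.Set.ofList (section_names.map String.toList)
  let kinds := lines.map (pvClassifyB nameset)
  (pvCollectB PySem.Dict.empty (lines.zip kinds)).items

-- ===== PRECONDITION & SPEC =====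
-- "line is a header variant of section c" (the condition both Pythons test, line already stripped)
def pvMatches (s : List Char) (c : String) : Bool :=
  s == c.toList || pvMarkers.any (fun m => s == m ++ c.toList || s == m ++ (' ' :: c.toList))

-- Pre_ excludes texts in which some line is simultaneously a header variant of two DISTINCT
-- section names: there A's section scan runs past the first match and emits accidental
-- empty entries for the earlier matches, an artefact of its implementation.
def Pre_run_py (text : String) (section_names : List String) : Prop :=
  ∀ l ∈ PySem.Chars.splitOn text.toList "\n".toList,
    ∀ c1 ∈ section_names, ∀ c2 ∈ section_names,
      pvMatches (PySem.Chars.strip l) c1 = true → pvMatches (PySem.Chars.strip l) c2 = true →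
        c1 = c2
instance (text : String) (section_names : List String) : Decidable (Pre_run_py text section_names) := by
  unfold Pre_run_py; infer_instance

def pvWitness_run_py : String × List String :=
  ("1. Intro\nalpha\n2. Other\nskip\nIntro\nbeta", ["Intro"])

def Spec_run_py (text : String) (section_names : List String) (out : List (String × String)) : Prop := out = run_py_alt text section_names
instance (text : String) (section_names : List String) (out : List (String × String)) : Decidable (Spec_run_py text section_names out) := by unfold Spec_run_py; infer_instance

-- ===== CLAIM (what is proved, stated in full; the proofs are below) =====
def Claim_equal_run_py : Prop := ∀ (text : String) (section_names : List String), Dom_run_py text section_names → Pre_run_py text section_names → Spec_run_py text section_names (run_py text section_names)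

-- ===== LEMMAS AND PROOFS =====

lemma pvMarkers_eq : pvMarkers =
    [['1','.',' '],['2','.',' '],['3','.',' '],['4','.',' '],['5','.',' '],['6','.',' '],
     ['7','.',' '],['8','.',' '],['9','.',' '],
     ['1','.'],['2','.'],['3','.'],['4','.'],['5','.'],['6','.'],['7','.'],['8','.'],['9','.']] := by
  decide

-- A's "startswith some marker" test equals Source B's two-character test
set_option maxHeartbeats 1000000 in
lemma pvBoundary_eq (s : List Char) :
    pvMarkers.any (fun m => PySem.Chars.startswith s m) =
      (match s with
       | a :: b :: _ => "123456789".toList.contains a && (b == '.')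
       | _ => false) := by
  rw [pvMarkers_eq]
  match s with
  | [] => decide
  | [a] => simp [PySem.Chars.startswith, List.isPrefixOf]
  | a :: b :: t =>
    simp only [List.any_cons, List.any_nil, PySem.Chars.startswith, List.isPrefixOf, Bool.or_false]
    show _ = (("123456789".toList.contains a) && (b == '.'))
    rw [show "123456789".toList = ['1','2','3','4','5','6','7','8','9'] from rfl]
    rw [Bool.eq_iff_iff]
    simp only [List.contains_eq_mem, List.mem_cons, List.not_mem_nil, or_false,
      Bool.or_eq_true, Bool.and_eq_true, beq_iff_eq, decide_eq_true_eq]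
    cases hp : [' '].isPrefixOf t <;> by_cases hb : b = '.' <;> simp [hb] <;> tauto

-- the set of section names, as an existence statement
lemma pvNameset_contains (names : List String) (u : List Char) :
    (PySem.Set.ofList (names.map String.toList)).contains u = true ↔ ∃ c ∈ names, c.toList = u := by
  rw [PySem.Set.contains_eq_decide]
  simp [PySem.Set.mem_ofList]

lemma pvDigit_markers (a : Char) (h : ("123456789".toList.contains a) = true) :
    [a, '.'] ∈ pvMarkers ∧ [a, '.', ' '] ∈ pvMarkers := by
  rw [show "123456789".toList = ['1','2','3','4','5','6','7','8','9'] from rfl] at h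
  simp only [List.contains_eq_mem, List.mem_cons, List.not_mem_nil, or_false,
    decide_eq_true_eq] at h
  rw [pvMarkers_eq]
  rcases h with rfl | rfl | rfl | rfl | rfl | rfl | rfl | rfl | rfl <;> exact ⟨by decide, by decide⟩

lemma pvMatches_of_bare {s : List Char} {c : String} (h : s = c.toList) :
    pvMatches s c = true := by
  simp [pvMatches, h]

lemma pvMatches_of_m2 {s : List Char} {c : String} {a : Char}
    (hd : ("123456789".toList.contains a) = true) (h : s = a :: '.' :: c.toList) :
    pvMatches s c = true := by
  simp only [pvMatches, Bool.or_eq_true, List.any_eq_true, beq_iff_eq]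
  exact Or.inr ⟨[a, '.'], (pvDigit_markers a hd).1, Or.inl (by simp [h])⟩

lemma pvMatches_of_m3 {s : List Char} {c : String} {a : Char}
    (hd : ("123456789".toList.contains a) = true) (h : s = a :: '.' :: ' ' :: c.toList) :
    pvMatches s c = true := by
  simp only [pvMatches, Bool.or_eq_true, List.any_eq_true, beq_iff_eq]
  exact Or.inr ⟨[a, '.', ' '], (pvDigit_markers a hd).2, Or.inl (by simp [h])⟩

lemma pvMatches_of_m4 {s : List Char} {c : String} {a : Char}
    (hd : ("123456789".toList.contains a) = true) (h : s = a :: '.' :: ' ' :: ' ' :: c.toList) :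
    pvMatches s c = true := by
  simp only [pvMatches, Bool.or_eq_true, List.any_eq_true, beq_iff_eq]
  exact Or.inr ⟨[a, '.', ' '], (pvDigit_markers a hd).2, Or.inr (by simp [h])⟩

-- every header variant of c has one of the four candidate shapes
lemma pvMatches_shapes (s : List Char) (c : String) (h : pvMatches s c = true) :
    s = c.toList ∨
    (∃ a t, ("123456789".toList.contains a) = true ∧ s = a :: '.' :: t ∧
      (t = c.toList ∨ (∃ t3, t = ' ' :: t3 ∧
        (t3 = c.toList ∨ (∃ t4, t3 = ' ' :: t4 ∧ t4 = c.toList))))) := by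
  simp only [pvMatches, Bool.or_eq_true, List.any_eq_true, beq_iff_eq] at h
  rcases h with h | ⟨m, hm, h | h⟩
  · exact Or.inl h
  · right
    rw [pvMarkers_eq] at hm
    simp only [List.mem_cons, List.not_mem_nil, or_false] at hm
    rcases hm with rfl|rfl|rfl|rfl|rfl|rfl|rfl|rfl|rfl|rfl|rfl|rfl|rfl|rfl|rfl|rfl|rfl|rfl <;>
      subst h <;>
      first
      | exact ⟨_, _, by decide, rfl, Or.inr ⟨_, rfl, Or.inl rfl⟩⟩
      | exact ⟨_, _, by decide, rfl, Or.inl rfl⟩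
  · right
    rw [pvMarkers_eq] at hm
    simp only [List.mem_cons, List.not_mem_nil, or_false] at hm
    rcases hm with rfl|rfl|rfl|rfl|rfl|rfl|rfl|rfl|rfl|rfl|rfl|rfl|rfl|rfl|rfl|rfl|rfl|rfl <;>
      subst h <;>
      first
      | exact ⟨_, _, by decide, rfl, Or.inr ⟨_, rfl, Or.inr ⟨_, rfl, rfl⟩⟩⟩
      | exact ⟨_, _, by decide, rfl, Or.inr ⟨_, rfl, Or.inl rfl⟩⟩

-- Source B's classify, characterised through pvMatches (needs the Pre_ uniqueness for the line)
lemma pvClassifyB_eq (names : List String) (line : List Char)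
    (hu : ∀ c1 ∈ names, ∀ c2 ∈ names,
      pvMatches (PySem.Chars.strip line) c1 = true →
      pvMatches (PySem.Chars.strip line) c2 = true → c1 = c2) :
    pvClassifyB (PySem.Set.ofList (names.map String.toList)) line =
      (match names.find? (fun c => pvMatches (PySem.Chars.strip line) c) with
       | some c => .header c
       | none =>
         if pvMarkers.any (fun m => PySem.Chars.startswith (PySem.Chars.strip line) m) then
           .boundary
         else .plain) := by
  simp only [pvClassifyB]
  rw [pvBoundary_eq]
  cases hf : names.find? (fun c => pvMatches (PySem.Chars.strip line) c) with
  | some c0 =>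
    have hm : pvMatches (PySem.Chars.strip line) c0 = true := List.find?_some hf
    have hmem : c0 ∈ names := List.mem_of_find?_eq_some hf
    by_cases h1 : (PySem.Set.ofList (names.map String.toList)).contains (PySem.Chars.strip line) = true
    · rw [if_pos h1]
      obtain ⟨c, hcmem, hcs⟩ := (pvNameset_contains names _).mp h1
      have hceq : c = c0 := hu c hcmem c0 hmem (pvMatches_of_bare hcs.symm) hm
      rw [← hcs, String.ofList_toList, hceq]
    · rw [if_neg h1]
      rcases pvMatches_shapes _ c0 hm with hsh | ⟨a, t, hd, hsh, hrest⟩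
      · exact absurd ((pvNameset_contains names _).mpr ⟨c0, hmem, hsh.symm⟩) h1
      rw [hsh]
      rw [hsh] at hu hm
      dsimp only
      rw [if_pos (by rw [hd]; decide)]
      by_cases h2 : (PySem.Set.ofList (names.map String.toList)).contains t = true
      · obtain ⟨c, hcmem, hcs⟩ := (pvNameset_contains names _).mp h2
        have hceq : c = c0 := hu c hcmem c0 hmem (pvMatches_of_m2 hd (by rw [hcs])) hm
        rw [if_pos h2, ← hcs, String.ofList_toList, hceq]
      · rw [if_neg h2]
        rcases hrest with hts | ⟨t3, ht3, hrest⟩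
        · exact absurd ((pvNameset_contains names _).mpr ⟨c0, hmem, hts.symm⟩) h2
        subst ht3
        rcases hrest with hts | ⟨t4, ht4, hrest⟩
        · -- the "d. c" form: t = ' ' :: c.toList
          subst hts
          have h3 : (PySem.Set.ofList (names.map String.toList)).contains
              ((' ' :: c0.toList).drop 1) = true :=
            by
              simp only [List.drop_succ_cons, List.drop_zero]
              rw [pvNameset_contains]
              exact ⟨c0, hmem, rfl⟩
          rw [if_pos (by rw [h3]; rfl)]
          all_goals simp [String.ofList_toList]
        · -- the "d.  c" form: t = ' ' :: ' ' :: c.toList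
          subst ht4
          subst hrest
          have h3 : (PySem.Set.ofList (names.map String.toList)).contains
              ((' ' :: ' ' :: c0.toList).drop 1) = true → False := by
            intro hcu
            obtain ⟨c, hcmem, hcs⟩ := (pvNameset_contains names _).mp hcu
            have : pvMatches (a :: '.' :: ' ' :: ' ' :: c0.toList) c = true :=
              pvMatches_of_m3 hd (by rw [hcs]; rfl)
            have hceq : c = c0 := hu c hcmem c0 hmem this hm
            subst hceq
            simp at hcs
          rw [if_neg (by
            intro hboth
            have hcu : (PySem.Set.ofList (names.map String.toList)).contains
                ((' ' :: ' ' :: c0.toList).drop 1) = true := by simpa using hboth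
            exact h3 hcu)]
          have h4 : (PySem.Set.ofList (names.map String.toList)).contains
              ((' ' :: ' ' :: c0.toList).drop 2) = true :=
            by
              simp only [List.drop_succ_cons, List.drop_zero]
              rw [pvNameset_contains]
              exact ⟨c0, hmem, rfl⟩
          rw [if_pos (by rw [h4]; rfl)]
          all_goals simp [String.ofList_toList]
  | none =>
    have hnone : ∀ c ∈ names, pvMatches (PySem.Chars.strip line) c = false :=
      fun c hc => Bool.eq_false_iff.mpr (List.find?_eq_none.mp hf c hc)
    have hnc : ∀ u, (PySem.Set.ofList (names.map String.toList)).contains u = true →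
        ∃ c ∈ names, c.toList = u := fun u hcu => (pvNameset_contains names u).mp hcu
    by_cases h1 : (PySem.Set.ofList (names.map String.toList)).contains (PySem.Chars.strip line) = true
    · obtain ⟨c, hcmem, hcs⟩ := hnc _ h1
      exact absurd (pvMatches_of_bare hcs.symm) (by rw [hnone c hcmem]; simp)
    · rw [if_neg h1]
      rcases hs : PySem.Chars.strip line with _ | ⟨a, _ | ⟨b, t⟩⟩
      · rfl
      · rfl
      · rw [hs] at hnone
        dsimp only
        by_cases hd : ("123456789".toList.contains a && (b == '.')) = true
        · have hd2 := hd
          simp only [Bool.and_eq_true] at hd2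
          have hda : ("123456789".toList.contains a) = true := hd2.1
          have hdb : b = '.' := by simpa using hd2.2
          subst hdb
          rw [if_pos hd, if_pos hd]
          have h2 : ¬ (PySem.Set.ofList (names.map String.toList)).contains t = true := by
            intro hcu
            obtain ⟨c, hcmem, hcs⟩ := hnc _ hcu
            exact absurd (pvMatches_of_m2 hda (by rw [hcs])) (by rw [hnone c hcmem]; simp)
          rw [if_neg h2]
          have h3 : ¬ (t.take 1 == [' '] && (PySem.Set.ofList (names.map String.toList)).contains
              (t.drop 1)) = true := by
            simp only [Bool.and_eq_true, not_and]
            intro htk hcu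
            obtain ⟨c, hcmem, hcs⟩ := hnc _ hcu
            rcases t with _ | ⟨x, t'⟩
            · simp at htk
            · have hx : x = ' ' := by simpa using htk
              subst hx
              simp only [List.drop_succ_cons, List.drop_zero] at hcs
              exact absurd (pvMatches_of_m3 hda (by rw [hcs]))
                (by rw [hnone c hcmem]; simp)
          rw [if_neg h3]
          have h4 : ¬ (t.take 2 == [' ', ' '] && (PySem.Set.ofList (names.map String.toList)).contains
              (t.drop 2)) = true := by
            simp only [Bool.and_eq_true, not_and]
            intro htk hcu
            obtain ⟨c, hcmem, hcs⟩ := hnc _ hcu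
            rcases t with _ | ⟨x, _ | ⟨y, t'⟩⟩
            · simp at htk
            · simp at htk
            · have hxy : x = ' ' ∧ y = ' ' := by
                constructor <;> · have := htk; simp at this; tauto
              obtain ⟨rfl, rfl⟩ := hxy
              simp only [List.drop_succ_cons, List.drop_zero] at hcs
              exact absurd (pvMatches_of_m4 hda (by rw [hcs]))
                (by rw [hnone c hcmem]; simp)
          rw [if_neg h4]
        · rw [if_neg hd, if_neg hd]

-- ---- A-side loop characterisations ----

lemma pvMarkerLoopA_none (names : List String) (s : List Char) (c : String)
    (ms : List (List Char)) (res : PySem.Dict String String) (cur : Option String)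
    (content : List (List Char))
    (h1 : (s == c.toList) = false)
    (h2 : ∀ m ∈ ms, (s == m ++ c.toList || s == m ++ (' ' :: c.toList)) = false) :
    pvMarkerLoopA names s c ms res cur content = (res, cur, content, false) := by
  induction ms with
  | nil => rfl
  | cons m ms' ih =>
    have hm := h2 m List.mem_cons_self
    simp only [Bool.or_eq_false_iff] at hm
    simp only [pvMarkerLoopA, h1, hm.1, hm.2, Bool.or_self]
    rw [if_neg (by simp)]
    exact ih (fun m' hm' => h2 m' (List.mem_cons_of_mem m hm'))

lemma pvMarkerLoopA_found (names : List String) (s : List Char) (c : String)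
    (ms : List (List Char)) (res : PySem.Dict String String) (cur : Option String)
    (content : List (List Char))
    (h : ((s == c.toList) = true ∧ ms ≠ [])
         ∨ ms.any (fun m => s == m ++ c.toList || s == m ++ (' ' :: c.toList)) = true) :
    pvMarkerLoopA names s c ms res cur content =
      (pvSaveA names res cur content, some c, [], true) := by
  induction ms with
  | nil =>
    rcases h with ⟨_, hne⟩ | h
    · exact absurd rfl hne
    · simp at h
  | cons m ms' ih =>
    by_cases hc : (s == c.toList || s == m ++ c.toList || s == m ++ (' ' :: c.toList)) = true
    · simp only [pvMarkerLoopA, if_pos hc]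
    · have hc' : (¬s = c.toList ∧ ¬s = m ++ c.toList) ∧ ¬s = m ++ ' ' :: c.toList := by
        simpa [Bool.or_eq_true, not_or, Bool.not_eq_true] using hc
      have ha : (s == c.toList) = false := beq_eq_false_iff_ne.mpr hc'.1.1
      have hb1 : (s == m ++ c.toList) = false := beq_eq_false_iff_ne.mpr hc'.1.2
      have hb2 : (s == m ++ (' ' :: c.toList)) = false := beq_eq_false_iff_ne.mpr hc'.2
      simp only [pvMarkerLoopA, if_neg hc]
      apply ih
      rcases h with ⟨hs, _⟩ | hany
      · rw [ha] at hs; exact absurd hs (by simp)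
      · simp only [List.any_cons, hb1, hb2, Bool.or_self, Bool.false_or] at hany
        exact Or.inr hany

lemma pvSectionLoopA_none (names : List String) (s : List Char) (secs : List String)
    (res : PySem.Dict String String) (cur : Option String) (content : List (List Char))
    (found : Bool)
    (h : ∀ c ∈ secs, pvMatches s c = false) :
    pvSectionLoopA names s secs res cur content found = (res, cur, content, found) := by
  induction secs with
  | nil => rfl
  | cons c rest ih =>
    have hm := h c List.mem_cons_self
    simp only [pvMatches, Bool.or_eq_false_iff, List.any_eq_false] at hm
    obtain ⟨h1, h2⟩ := hm
    simp only [pvSectionLoopA,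
      pvMarkerLoopA_none names s c pvMarkers res cur content h1
        (fun m hm' => by simpa using h2 m hm'), h1, Bool.or_false, if_neg Bool.false_ne_true]
    exact ih (fun c' hc' => h c' (List.mem_cons_of_mem c hc'))

-- the marker loop fires exactly when the line is a header variant of c
lemma pvMarkerLoopA_matches (names : List String) (s : List Char) (c : String)
    (res : PySem.Dict String String) (cur : Option String) (content : List (List Char))
    (h : pvMatches s c = true) :
    pvMarkerLoopA names s c pvMarkers res cur content =
      (pvSaveA names res cur content, some c, [], true) := by
  apply pvMarkerLoopA_found
  have h' := h
  simp only [pvMatches, Bool.or_eq_true] at h'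
  rcases h' with h' | h'
  · exact Or.inl ⟨h', by rw [pvMarkers_eq]; simp⟩
  · exact Or.inr h'

lemma pvMatches_false_parts (s : List Char) (c : String) (h : pvMatches s c = false) :
    (s == c.toList) = false ∧
      ∀ m ∈ pvMarkers, (s == m ++ c.toList || s == m ++ (' ' :: c.toList)) = false := by
  simp only [pvMatches, Bool.or_eq_false_iff, List.any_eq_false] at h
  exact ⟨h.1, fun m hm => by simpa using h.2 m hm⟩

lemma pvSaveA_some (names : List String) (res : PySem.Dict String String) (c : String)
    (content : List (List Char)) (hc : names.contains c = true) :
    pvSaveA names res (some c) content =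
      res.insert c (String.ofList (PySem.Chars.strip (PySem.Chars.join "\n".toList content))) := by
  simp only [pvSaveA, hc]
  rw [if_pos (by trivial)]

lemma pvSectionLoopA_after (names : List String) (s : List Char) (c0 : String)
    (hc0 : names.contains c0 = true) :
    ∀ (secs : List String) (res : PySem.Dict String String),
      (∀ c ∈ secs, pvMatches s c = true → c = c0) →
      ∃ res', pvSectionLoopA names s secs res (some c0) [] true = (res', some c0, [], true) ∧
        ∀ v, res'.insert c0 v = res.insert c0 v := by
  intro secs
  induction secs with
  | nil => exact fun res _ => ⟨res, rfl, fun v => rfl⟩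
  | cons c rest ih =>
    intro res h
    by_cases hm : pvMatches s c = true
    · have hcc : c = c0 := h c List.mem_cons_self hm
      subst hcc
      simp only [pvSectionLoopA, pvMarkerLoopA_matches names s c res (some c) [] hm,
        pvSaveA_some names res c [] hc0]
      by_cases hb : (s == c.toList) = true
      · rw [if_pos hb]
        refine ⟨_, rfl, fun v => ?_⟩
        rw [pvSaveA_some _ _ _ _ hc0, PySem.Dict.insert_insert_self,
          PySem.Dict.insert_insert_self]
      · rw [if_neg hb]
        obtain ⟨res', hr, hp'⟩ :=
          ih (res.insert c (String.ofList (PySem.Chars.strip (PySem.Chars.join "\n".toList []))))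
            (fun d hd hmd => h d (List.mem_cons_of_mem c hd) hmd)
        exact ⟨res', by simpa using hr,
          fun v => by rw [hp' v, PySem.Dict.insert_insert_self]⟩
    · have hm' : pvMatches s c = false := Bool.eq_false_iff.mpr hm
      obtain ⟨h1, h2⟩ := pvMatches_false_parts s c hm'
      simp only [pvSectionLoopA, pvMarkerLoopA_none names s c pvMarkers res (some c0) [] h1 h2,
        h1, Bool.or_false]
      rw [if_neg (by simp)]
      exact ih res (fun d hd hmd => h d (List.mem_cons_of_mem c hd) hmd)

lemma pvSectionLoopA_found (names : List String) (s : List Char) (c0 : String)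
    (hc0 : names.contains c0 = true) :
    ∀ (secs : List String) (res : PySem.Dict String String) (cur : Option String)
      (content : List (List Char)) (found : Bool),
      (∀ c ∈ secs, pvMatches s c = true → c = c0) →
      (∃ c ∈ secs, pvMatches s c = true) →
      ∃ res', pvSectionLoopA names s secs res cur content found = (res', some c0, [], true) ∧
        ∀ v, res'.insert c0 v = (pvSaveA names res cur content).insert c0 v := by
  intro secs
  induction secs with
  | nil =>
    intro res cur content found h hex
    simp at hex
  | cons c rest ih =>
    intro res cur content found h hex
    by_cases hm : pvMatches s c = true
    · have hcc : c = c0 := h c List.mem_cons_self hm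
      subst hcc
      simp only [pvSectionLoopA, pvMarkerLoopA_matches names s c res cur content hm]
      by_cases hb : (s == c.toList) = true
      · rw [if_pos hb]
        refine ⟨_, rfl, fun v => ?_⟩
        rw [pvSaveA_some _ _ _ _ hc0, PySem.Dict.insert_insert_self]
      · rw [if_neg hb]
        obtain ⟨res', hr, hp'⟩ :=
          pvSectionLoopA_after names s c hc0 rest (pvSaveA names res cur content)
            (fun d hd hmd => h d (List.mem_cons_of_mem c hd) hmd)
        exact ⟨res', by simpa using hr, hp'⟩
    · have hm' : pvMatches s c = false := Bool.eq_false_iff.mpr hm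
      obtain ⟨h1, h2⟩ := pvMatches_false_parts s c hm'
      simp only [pvSectionLoopA, pvMarkerLoopA_none names s c pvMarkers res cur content h1 h2,
        h1, Bool.or_false]
      rw [if_neg (by simp)]
      apply ih res cur content found (fun d hd hmd => h d (List.mem_cons_of_mem c hd) hmd)
      rcases hex with ⟨d, hd, hmd⟩
      rcases List.mem_cons.mp hd with rfl | hd'
      · exact absurd hmd hm
      · exact ⟨d, hd', hmd⟩

lemma pvBoundaryLoopA_cur_none (names : List String) (s : List Char)
    (ms : List (List Char)) (res : PySem.Dict String String) (content : List (List Char)) :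
    pvBoundaryLoopA names s ms res none content = (res, none) := by
  induction ms with
  | nil => rfl
  | cons m ms' ih => simpa [pvBoundaryLoopA] using ih

lemma pvBoundaryLoopA_none (names : List String) (s : List Char)
    (ms : List (List Char)) (res : PySem.Dict String String) (cur : Option String)
    (content : List (List Char))
    (h : ∀ m ∈ ms, PySem.Chars.startswith s m = false) :
    pvBoundaryLoopA names s ms res cur content = (res, cur) := by
  induction ms with
  | nil => rfl
  | cons m ms' ih =>
    simp only [pvBoundaryLoopA, h m List.mem_cons_self, Bool.false_and]
    rw [if_neg (by simp)]
    exact ih (fun m' hm' => h m' (List.mem_cons_of_mem m hm'))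

lemma pvBoundaryLoopA_hit (names : List String) (s : List Char)
    (ms : List (List Char)) (res : PySem.Dict String String) (c : String)
    (content : List (List Char))
    (hc : names.contains c = true)
    (h : ms.any (fun m => PySem.Chars.startswith s m) = true) :
    pvBoundaryLoopA names s ms res (some c) content =
      (pvSaveA names res (some c) content, none) := by
  induction ms with
  | nil => simp at h
  | cons m ms' ih =>
    cases hsw : PySem.Chars.startswith s m
    · simp only [pvBoundaryLoopA, hsw, Bool.false_and]
      rw [if_neg (by simp)]
      apply ih
      simpa [hsw] using h
    · simp only [pvBoundaryLoopA, hsw, hc, Bool.true_and]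
      rw [if_pos (by trivial)]

-- ---- the main induction ----

-- A's remaining processing (fold over the remaining lines, then the final save)
def pvAfterA (names : List String)
    (st : PySem.Dict String String × Option String × List (List Char))
    (ls : List (List Char)) : PySem.Dict String String :=
  let fin := ls.foldl (pvLineA names) st
  pvSaveA names fin.1 fin.2.1 fin.2.2

lemma pvContains {c : String} {names : List String} (h : c ∈ names) :
    names.contains c = true := by
  simpa [List.contains_eq_mem] using h

lemma pvAfterA_cons (names : List String)
    (st : PySem.Dict String String × Option String × List (List Char))
    (l : List Char) (ls : List (List Char)) :
    pvAfterA names st (l :: ls) = pvAfterA names (pvLineA names st l) ls := rfl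

lemma pvMain (names : List String) :
    ∀ (pairs : List (List Char × PvKind)) (res : PySem.Dict String String)
      (cur : Option String) (content : List (List Char)),
      (∀ p ∈ pairs, p.2 = pvClassifyB (PySem.Set.ofList (names.map String.toList)) p.1) →
      (∀ p ∈ pairs, ∀ c1 ∈ names, ∀ c2 ∈ names,
        pvMatches (PySem.Chars.strip p.1) c1 = true →
        pvMatches (PySem.Chars.strip p.1) c2 = true → c1 = c2) →
      (∀ c, cur = some c → c ∈ names) →
      pvAfterA names (res, cur, content) (pairs.map (·.1)) =
        pvCollectB
          (match cur with
           | none => res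
           | some c => res.insert c (String.ofList (PySem.Chars.strip (PySem.Chars.join "\n".toList
               (content ++ (pairs.takeWhile (fun p => pvIsPlain p.2)).map (·.1)))))) pairs := by
  intro pairs
  induction pairs with
  | nil =>
    intro res cur content hk hpre hcur
    cases cur with
    | none => rfl
    | some c =>
      have hc : names.contains c = true := pvContains (hcur c rfl)
      show pvSaveA names res (some c) content = _
      rw [pvSaveA_some names res c content hc]
      simp [pvCollectB]
  | cons p rest ih =>
    obtain ⟨l, k⟩ := p
    intro res cur content hk hpre hcur
    have hkl : k = pvClassifyB (PySem.Set.ofList (names.map String.toList)) l :=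
      hk (l, k) List.mem_cons_self
    have hul : ∀ c1 ∈ names, ∀ c2 ∈ names,
        pvMatches (PySem.Chars.strip l) c1 = true →
        pvMatches (PySem.Chars.strip l) c2 = true → c1 = c2 :=
      hpre (l, k) List.mem_cons_self
    rw [pvClassifyB_eq names l hul] at hkl
    have hkrest : ∀ p ∈ rest, p.2 = pvClassifyB (PySem.Set.ofList (names.map String.toList)) p.1 :=
      fun p hp => hk p (List.mem_cons_of_mem _ hp)
    have hprest : ∀ p ∈ rest, ∀ c1 ∈ names, ∀ c2 ∈ names,
        pvMatches (PySem.Chars.strip p.1) c1 = true →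
        pvMatches (PySem.Chars.strip p.1) c2 = true → c1 = c2 :=
      fun p hp => hpre p (List.mem_cons_of_mem _ hp)
    simp only [List.map_cons, pvAfterA_cons]
    cases hf : names.find? (fun c => pvMatches (PySem.Chars.strip l) c) with
    | some c0 =>
      rw [hf] at hkl
      simp only at hkl
      subst hkl
      have hm : pvMatches (PySem.Chars.strip l) c0 = true := List.find?_some hf
      have hmem : c0 ∈ names := List.mem_of_find?_eq_some hf
      have hc0 : names.contains c0 = true := pvContains hmem
      have huniq : ∀ c ∈ names, pvMatches (PySem.Chars.strip l) c = true → c = c0 :=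
        fun c hc h' => hpre (l, PvKind.header c0) List.mem_cons_self c hc c0 hmem h' hm
      obtain ⟨res', hr, hins⟩ :=
        pvSectionLoopA_found names (PySem.Chars.strip l) c0 hc0 names res cur content false
          huniq ⟨c0, hmem, hm⟩
      have hline : pvLineA names (res, cur, content) l = (res', some c0, []) := by
        simp only [pvLineA, hr]
        exact if_pos trivial
      rw [hline, ih res' (some c0) [] hkrest hprest
        (fun c hc => by injection hc with h'; rw [← h']; exact hmem)]
      dsimp only
      rw [hins]
      cases cur with
      | none => simp [pvCollectB, pvSaveA, pvIsPlain]
      | some c =>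
        rw [show pvSaveA names res (some c) content =
            res.insert c (String.ofList (PySem.Chars.strip (PySem.Chars.join "\n".toList content)))
          from pvSaveA_some names res c content (pvContains (hcur c rfl))]
        simp [pvCollectB, pvIsPlain]
    | none =>
      rw [hf] at hkl
      simp only at hkl
      have hnone : ∀ c ∈ names, pvMatches (PySem.Chars.strip l) c = false :=
        fun c hc => Bool.eq_false_iff.mpr (List.find?_eq_none.mp hf c hc)
      have hsec := pvSectionLoopA_none names (PySem.Chars.strip l) names res cur content false hnone
      cases hB : pvMarkers.any (fun m => PySem.Chars.startswith (PySem.Chars.strip l) m) with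
      | true =>
        rw [hB] at hkl
        simp at hkl
        subst hkl
        cases cur with
        | none =>
          have hline : pvLineA names (res, none, content) l = (res, none, content) := by
            simp only [pvLineA, hsec, pvBoundaryLoopA_cur_none]
            exact if_neg (by simp)
          rw [hline, ih res none content hkrest hprest (fun c hc => by cases hc)]
          simp [pvCollectB]
        | some c =>
          have hc : names.contains c = true := pvContains (hcur c rfl)
          have hline : pvLineA names (res, some c, content) l =
              (pvSaveA names res (some c) content, none, content) := by
            simp only [pvLineA, hsec,
              pvBoundaryLoopA_hit names (PySem.Chars.strip l) pvMarkers res c content hc hB]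
            exact if_neg (by simp)
          rw [hline, ih _ none content hkrest hprest (fun c' hc' => by cases hc')]
          rw [pvSaveA_some names res c content hc]
          simp [pvCollectB, pvIsPlain]
      | false =>
        rw [hB] at hkl
        simp at hkl
        subst hkl
        have hbl : ∀ (r : PySem.Dict String String) (cu : Option String) (co : List (List Char)),
            pvBoundaryLoopA names (PySem.Chars.strip l) pvMarkers r cu co = (r, cu) :=
          fun r cu co => pvBoundaryLoopA_none names (PySem.Chars.strip l) pvMarkers r cu co
            (fun m hm' => by
              have := List.any_eq_false.mp hB m hm'
              simpa using this)
        cases cur with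
        | none =>
          have hline : pvLineA names (res, none, content) l = (res, none, content) := by
            simp only [pvLineA, hsec, hbl]
            exact if_neg (by simp)
          rw [hline, ih res none content hkrest hprest (fun c hc => by cases hc)]
          simp [pvCollectB]
        | some c =>
          have hc : names.contains c = true := pvContains (hcur c rfl)
          have hline : pvLineA names (res, some c, content) l = (res, some c, content ++ [l]) := by
            simp only [pvLineA, hsec, hbl, hc]
            exact if_neg (by simp)
          rw [hline, ih res (some c) (content ++ [l]) hkrest hprest hcur]
          simp [pvCollectB, pvIsPlain]


-- ===== VERDICT (by name: the statement is the Claim_ definition above) =====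
theorem run_py_spec : Claim_equal_run_py := by
  unfold Claim_equal_run_py
  intro text names _hdom hpre
  unfold Spec_run_py
  set g := pvClassifyB (PySem.Set.ofList (names.map String.toList)) with hg
  set lines := PySem.Chars.splitOn text.toList "\n".toList with hl
  have hzl : lines.zip (lines.map g) = lines.map (fun x => (x, g x)) := by
    induction lines with
    | nil => rfl
    | cons x xs ihl => simp [ihl]
  have hk : ∀ p ∈ lines.map (fun x => (x, g x)), p.2 = g p.1 := by
    intro p hp
    obtain ⟨x, hx, rfl⟩ := List.mem_map.mp hp
    rfl
  have hpre' : ∀ p ∈ lines.map (fun x => (x, g x)), ∀ c1 ∈ names, ∀ c2 ∈ names,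
      pvMatches (PySem.Chars.strip p.1) c1 = true →
      pvMatches (PySem.Chars.strip p.1) c2 = true → c1 = c2 := by
    intro p hp c1 h1 c2 h2 hm1 hm2
    obtain ⟨x, hx, rfl⟩ := List.mem_map.mp hp
    exact hpre x hx c1 h1 c2 h2 hm1 hm2
  have hmain := pvMain names (lines.map (fun x => (x, g x))) PySem.Dict.empty none []
    (by rw [hg] at hk; exact hk) hpre' (fun c hc => by cases hc)
  have hfst : (lines.map (fun x => (x, g x))).map (·.1) = lines := by
    simp [List.map_map, Function.comp_def]
  rw [hfst] at hmain
  show (pvAfterA names (PySem.Dict.empty, none, []) lines).items =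
       (pvCollectB PySem.Dict.empty (lines.zip (lines.map g))).items
  rw [hzl]
  exact congrArg PySem.Dict.items hmain
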